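-- pv_equiv track=rewrite | github.com/rutzsco/AZFunctions_Ingestion_Quickstart_v3 | chunking_utils.py | group_by_semantic_boundaries
-- ===== SOURCE A (Python) =====
-- def is_heading(node):
--     """
--     Determines if a node is a heading.
--     In our AST, we assume a node with type 'heading' is a semantic boundary.
--     """
--     return node.get('type') == 'heading'
--
-- def group_by_semantic_boundaries(ast_nodes):
--     """
--     Groups AST nodes into sections using headings as boundaries.
--     Each time a heading node is encountered, a new section starts.
--
--     Parameters:
--       ast_nodes (list of dict): The AST nodes in document order.
--
--     Returns:
--       list of lists: Each inner list is a section (a list of nodes).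
--     """
--     sections = []
--     current_section = []
--     for node in ast_nodes:
--         if is_heading(node):
--             if current_section:
--                 sections.append(current_section)
--             current_section = [node]
--         else:
--             current_section.append(node)
--     if current_section:
--         sections.append(current_section)
--     return sections
-- ===== SOURCE B (Python) =====
-- def is_heading(node):
--     return node.get('type') == 'heading'
--
-- def group_by_semantic_boundaries(ast_nodes):
--     # Slice off one whole section at a time: a section is the first node
--     # plus every following node up to (not including) the next heading.
--     sections = []
--     rest = ast_nodes
--     while rest:
--         i = 1
--         while i < len(rest) and not is_heading(rest[i]):
--             i += 1
--         sections.append(rest[:i])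
--         rest = rest[i:]
--     return sections
-- ===== Notes on version B (the rewrite author's own statement) =====
-- stated objective: alternative
-- what changed: A streams nodes into a growing current_section accumulator with a flush at each heading and at the end; B instead peels off one whole section per outer step by scanning to the next heading and slicing, with no accumulator or final flush.
import Mathlib
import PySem

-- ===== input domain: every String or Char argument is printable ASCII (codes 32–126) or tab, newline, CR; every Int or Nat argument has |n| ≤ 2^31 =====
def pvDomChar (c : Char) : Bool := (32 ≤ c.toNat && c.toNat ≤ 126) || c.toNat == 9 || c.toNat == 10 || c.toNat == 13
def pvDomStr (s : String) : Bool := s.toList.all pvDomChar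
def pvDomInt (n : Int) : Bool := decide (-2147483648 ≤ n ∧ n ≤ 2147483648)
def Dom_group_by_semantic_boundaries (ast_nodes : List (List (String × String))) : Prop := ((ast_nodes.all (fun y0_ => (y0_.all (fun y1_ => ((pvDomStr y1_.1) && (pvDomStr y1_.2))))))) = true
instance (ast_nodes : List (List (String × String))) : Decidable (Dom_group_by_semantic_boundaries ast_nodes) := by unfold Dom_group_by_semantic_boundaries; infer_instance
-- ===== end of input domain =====

-- B peels off one whole section per step (scan to next heading, then slice), instead of
-- A's node-by-node accumulator with a flush at each heading and at the end (objective: alternative).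

-- ===== PORT A =====
-- is_heading: node.get('type') == 'heading'
def pvIsHeading (node : List (String × String)) : Bool :=
  (PySem.Dict.mk node).get? "type" == some "heading"

def group_by_semantic_boundaries (ast_nodes : List (List (String × String))) : List (List (List (String × String))) :=
  -- for node in ast_nodes: …  as a foldl over (sections, current_section)
  let st := ast_nodes.foldl
    (fun (acc : List (List (List (String × String))) × List (List (String × String))) node =>
      if pvIsHeading node then
        (if acc.2 ≠ [] then acc.1 ++ [acc.2] else acc.1, [node])
      else
        (acc.1, acc.2 ++ [node]))
    ([], [])
  if st.2 ≠ [] then st.1 ++ [st.2] else st.1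

-- ===== PORT B =====
-- inner while loop: i = 1 + number of leading non-heading nodes of rest[1:]
def pvSectionTail (t : List (List (String × String))) : Nat :=
  match t with
  | [] => 0
  | n :: t' => if pvIsHeading n then 0 else 1 + pvSectionTail t'

def group_by_semantic_boundaries_alt (ast_nodes : List (List (String × String))) : List (List (List (String × String))) :=
  match ast_nodes with
  | [] => []
  | h :: t =>
    let i := 1 + pvSectionTail t
    (h :: t).take i :: group_by_semantic_boundaries_alt ((h :: t).drop i)
termination_by ast_nodes.length
decreasing_by
  simp only [List.length_drop, List.length_cons]
  omega

-- ===== PRECONDITION & SPEC =====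
def Spec_group_by_semantic_boundaries (ast_nodes : List (List (String × String))) (out : List (List (List (String × String)))) : Prop := out = group_by_semantic_boundaries_alt ast_nodes
instance (ast_nodes : List (List (String × String))) (out : List (List (List (String × String)))) : Decidable (Spec_group_by_semantic_boundaries ast_nodes out) := by unfold Spec_group_by_semantic_boundaries; infer_instance

-- ===== CLAIM (what is proved, stated in full; the proofs are below) =====
def Claim_equal_group_by_semantic_boundaries : Prop := ∀ (ast_nodes : List (List (String × String))), Dom_group_by_semantic_boundaries ast_nodes → Spec_group_by_semantic_boundaries ast_nodes (group_by_semantic_boundaries ast_nodes)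

-- ===== LEMMAS AND PROOFS =====

-- A's step function, named for the proofs
def pvStepA (acc : List (List (List (String × String))) × List (List (String × String)))
    (node : List (String × String)) :
    List (List (List (String × String))) × List (List (String × String)) :=
  if pvIsHeading node then
    (if acc.2 ≠ [] then acc.1 ++ [acc.2] else acc.1, [node])
  else
    (acc.1, acc.2 ++ [node])

-- recursive characterisation of A's remaining run from a nonempty current section
def pvSectionsFrom (cur : List (List (String × String))) (nodes : List (List (String × String))) :
    List (List (List (String × String))) :=
  match nodes with
  | [] => [cur]
  | n :: rest => if pvIsHeading n then cur :: pvSectionsFrom [n] rest else pvSectionsFrom (cur ++ [n]) rest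

theorem pvFoldA_eq_sectionsFrom (nodes : List (List (String × String)))
    (secs : List (List (List (String × String)))) (cur : List (List (String × String)))
    (hc : cur ≠ []) :
    (if (nodes.foldl pvStepA (secs, cur)).2 ≠ [] then
        (nodes.foldl pvStepA (secs, cur)).1 ++ [(nodes.foldl pvStepA (secs, cur)).2]
      else (nodes.foldl pvStepA (secs, cur)).1)
      = secs ++ pvSectionsFrom cur nodes := by
  induction nodes generalizing secs cur with
  | nil => simp [pvSectionsFrom, hc]
  | cons n rest ih =>
    simp only [List.foldl_cons, pvSectionsFrom]
    by_cases h : pvIsHeading n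
    · simp only [pvStepA, h, if_pos, hc, ne_eq, not_false_iff]
      rw [ih _ [n] (by simp)]
      simp
    · simp only [pvStepA, h, if_neg, Bool.false_eq_true, not_false_iff]
      exact ih _ (cur ++ [n]) (by simp)

theorem pvTake_tail_len (t : List (List (String × String))) :
    t.take (pvSectionTail t) = t.takeWhile (fun n => !pvIsHeading n) := by
  induction t with
  | nil => rfl
  | cons n t' ih =>
    by_cases h : pvIsHeading n
    · simp [pvSectionTail, h]
    · rw [pvSectionTail, if_neg h, Nat.add_comm]
      simp [h, ih]

theorem pvDrop_tail_len (t : List (List (String × String))) :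
    t.drop (pvSectionTail t) = t.dropWhile (fun n => !pvIsHeading n) := by
  induction t with
  | nil => rfl
  | cons n t' ih =>
    by_cases h : pvIsHeading n
    · simp [pvSectionTail, h]
    · rw [pvSectionTail, if_neg h, Nat.add_comm]
      simp [h, ih]

theorem pvAlt_cons (h : List (String × String)) (t : List (List (String × String))) :
    group_by_semantic_boundaries_alt (h :: t)
      = (h :: t.takeWhile (fun n => !pvIsHeading n))
        :: group_by_semantic_boundaries_alt (t.dropWhile (fun n => !pvIsHeading n)) := by
  rw [group_by_semantic_boundaries_alt]
  simp only [List.take_succ_cons, List.drop_succ_cons, Nat.add_comm 1 (pvSectionTail t)]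
  rw [pvTake_tail_len, pvDrop_tail_len]

theorem pvSectionsFrom_eq_alt (nodes : List (List (String × String))) (cur : List (List (String × String))) :
    pvSectionsFrom cur nodes
      = (cur ++ nodes.takeWhile (fun n => !pvIsHeading n))
        :: group_by_semantic_boundaries_alt (nodes.dropWhile (fun n => !pvIsHeading n)) := by
  induction nodes generalizing cur with
  | nil => simp [pvSectionsFrom, group_by_semantic_boundaries_alt]
  | cons n rest ih =>
    by_cases h : pvIsHeading n
    · simp only [pvSectionsFrom, h, if_pos, List.takeWhile_cons, List.dropWhile_cons,
        Bool.not_true, if_neg, Bool.false_eq_true, not_false_iff]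
      rw [ih [n], pvAlt_cons]
      simp
    · simp only [pvSectionsFrom, h, Bool.false_eq_true, if_neg, not_false_iff,
        List.takeWhile_cons, List.dropWhile_cons, Bool.not_false, if_pos]
      rw [ih (cur ++ [n])]
      simp

-- ===== VERDICT (by name: the statement is the Claim_ definition above) =====
theorem group_by_semantic_boundaries_spec : Claim_equal_group_by_semantic_boundaries := by
  intro ast_nodes _
  unfold Spec_group_by_semantic_boundaries group_by_semantic_boundaries
  cases ast_nodes with
  | nil => simp [group_by_semantic_boundaries_alt]
  | cons n rest =>
    have h1 : (n :: rest).foldl pvStepA ([], []) = rest.foldl pvStepA ([], [n]) := by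
      simp only [List.foldl_cons, pvStepA]
      by_cases h : pvIsHeading n <;> simp [h]
    show (if (List.foldl _ ([], []) (n :: rest)).2 ≠ [] then _ else _) = _
    have hstep : (List.foldl (fun (acc : List (List (List (String × String))) × List (List (String × String))) node =>
        if pvIsHeading node then
          (if acc.2 ≠ [] then acc.1 ++ [acc.2] else acc.1, [node])
        else
          (acc.1, acc.2 ++ [node])) ([], []) (n :: rest))
        = (n :: rest).foldl pvStepA ([], []) := rfl
    rw [hstep, h1, pvFoldA_eq_sectionsFrom rest [] [n] (by simp), pvSectionsFrom_eq_alt,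
      pvAlt_cons]
    simp
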